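-- pv_equiv track=rewrite | github.com/n0m4d27/WIP | tasktracker/ui/settings_store.py | normalize_section_order
-- ===== SOURCE A (Python) =====
-- from typing import Any
--
-- TASK_SECTION_IDS: tuple[str, ...] = (
--     "todos",
--     "notes",
--     "blockers",
--     "recurring",
--     "attachments",
--     "activity",
-- )
--
-- def normalize_section_order(order: list[Any]) -> list[str]:
--     """Return a permutation of TASK_SECTION_IDS: user order first, then any missing tails."""
--     seen: set[str] = set()
--     out: list[str] = []
--     for x in order:
--         s = str(x)
--         if s in TASK_SECTION_IDS and s not in seen:
--             out.append(s)
--             seen.add(s)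
--     for sid in TASK_SECTION_IDS:
--         if sid not in seen:
--             out.append(sid)
--     return out
-- ===== SOURCE B (Python) =====
-- from typing import Any
--
-- TASK_SECTION_IDS: tuple[str, ...] = (
--     "todos",
--     "notes",
--     "blockers",
--     "recurring",
--     "attachments",
--     "activity",
-- )
--
-- def normalize_section_order(order: list[Any]) -> list[str]:
--     """Return a permutation of TASK_SECTION_IDS: user order first, then any missing tails."""
--     n = len(order)
--     # sort key: first-occurrence index for present sections, n + canonical rank for missing ones
--     rank = {sid: n + i for i, sid in enumerate(TASK_SECTION_IDS)}
--     for i, x in enumerate(order):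
--         s = str(x)
--         if s in rank and rank[s] >= n:  # still at its missing sentinel => first occurrence
--             rank[s] = i
--     return sorted(TASK_SECTION_IDS, key=lambda sid: rank[sid])
-- ===== Notes on version B (the rewrite author's own statement) =====
-- stated objective: alternative
-- what changed: A dedup-filters the order list and then appends the missing IDs in a second pass; B builds a first-occurrence index table (missing IDs pre-seeded with sentinel ranks len(order)+i) in one scan and returns the six fixed IDs sorted by that key.
import Mathlib
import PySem

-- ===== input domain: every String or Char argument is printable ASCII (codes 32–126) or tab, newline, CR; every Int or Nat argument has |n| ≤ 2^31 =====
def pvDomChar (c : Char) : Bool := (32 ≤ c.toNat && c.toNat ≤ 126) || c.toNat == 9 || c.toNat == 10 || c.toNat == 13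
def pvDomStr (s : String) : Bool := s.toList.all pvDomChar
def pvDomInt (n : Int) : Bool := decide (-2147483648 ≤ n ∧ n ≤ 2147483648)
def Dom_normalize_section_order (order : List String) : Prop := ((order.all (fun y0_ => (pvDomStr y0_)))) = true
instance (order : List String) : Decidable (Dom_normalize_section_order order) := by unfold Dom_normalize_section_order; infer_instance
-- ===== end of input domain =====

-- B replaces A's two ordered passes (dedup-filter, then append the missing tails) by a
-- sentinel-initialised first-occurrence index table plus one keyed sort of the six fixed IDs
-- (objective: alternative).

-- module constant TASK_SECTION_IDS (a tuple of strings)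
def pvIDS : List String := ["todos", "notes", "blockers", "recurring", "attachments", "activity"]

-- ===== PORT A =====
def normalize_section_order (order : List String) : List String :=
  -- seen = set(); out = []; for x in order: s = str(x) (= x on a str); filter + dedup
  let st := order.foldl
    (fun (st : PySem.Set String × List String) x =>
      let s := x
      if pvIDS.contains s && !(PySem.Set.contains st.1 s) then
        (PySem.Set.add st.1 s, st.2 ++ [s])
      else st)
    (PySem.Set.empty, [])
  -- for sid in TASK_SECTION_IDS: if sid not in seen: out.append(sid)
  pvIDS.foldl (fun out sid => if !(PySem.Set.contains st.1 sid) then out ++ [sid] else out) st.2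

-- ===== PORT B =====
def normalize_section_order_alt (order : List String) : List String :=
  let n : Int := order.length
  -- rank = {sid: n + i for i, sid in enumerate(TASK_SECTION_IDS)}
  let rank0 : PySem.Dict String Int :=
    (PySem.List.enumerate pvIDS).foldl (fun d p => d.insert p.2 (n + p.1)) PySem.Dict.empty
  -- for i, x in enumerate(order): s = str(x); if s in rank and rank[s] >= n: rank[s] = i
  let rank := (PySem.List.enumerate order).foldl
    (fun d (p : Int × String) =>
      let s := p.2
      -- rank[s] is guarded by 's in rank', so getD's default is never consulted
      if d.contains s && decide (d.getD s 0 ≥ n) then d.insert s p.1 else d)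
    rank0
  -- sorted(TASK_SECTION_IDS, key=lambda sid: rank[sid]); every sid is a key of rank
  PySem.List.sorted pvIDS (fun sid => rank.getD sid 0)

-- ===== PRECONDITION & SPEC =====
def Spec_normalize_section_order (order : List String) (out : List String) : Prop := out = normalize_section_order_alt order
instance (order : List String) (out : List String) : Decidable (Spec_normalize_section_order order out) := by unfold Spec_normalize_section_order; infer_instance

-- ===== CLAIM (what is proved, stated in full; the proofs are below) =====
def Claim_equal_normalize_section_order : Prop := ∀ (order : List String), Dom_normalize_section_order order → Spec_normalize_section_order order (normalize_section_order order)

-- ===== LEMMAS AND PROOFS =====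

def pvKey (order : List String) (sid : String) : Int :=
  match order.findIdx? (· == sid) with
  | some i => (i : Int)
  | none => (order.length : Int) + (pvIDS.idxOf sid : Int)

theorem pvKey_of_mem {order : List String} {sid : String} (h : sid ∈ order) :
    ∃ i : Nat, order.findIdx? (· == sid) = some i ∧ i < order.length ∧ pvKey order sid = (i : Int) := by
  have h1 : order.findIdx? (· == sid) ≠ none := by
    intro hc
    rw [List.findIdx?_eq_none_iff] at hc
    simpa using hc sid h
  rcases ho : order.findIdx? (· == sid) with _ | i
  · exact absurd ho h1
  · refine ⟨i, rfl, ?_, ?_⟩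
    · rw [List.findIdx?_eq_some_iff_findIdx_eq] at ho; omega
    · unfold pvKey; rw [ho]

theorem pvKey_of_not_mem {order : List String} {sid : String} (h : sid ∉ order) :
    pvKey order sid = (order.length : Int) + (pvIDS.idxOf sid : Int) := by
  have h1 : order.findIdx? (· == sid) = none := by
    rw [List.findIdx?_eq_none_iff]
    intro x hx
    simp only [beq_eq_false_iff_ne, ne_eq]
    rintro rfl; exact h hx
  unfold pvKey; rw [h1]

theorem pvKey_fresh {p t : List String} {x : String} (hx : x ∉ p) :
    pvKey (p ++ x :: t) x = (p.length : Int) := by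
  have h1 : p.findIdx? (· == x) = none := by
    rw [List.findIdx?_eq_none_iff]
    intro y hy
    simp only [beq_eq_false_iff_ne, ne_eq]
    rintro rfl; exact hx hy
  unfold pvKey
  rw [List.findIdx?_append, h1]
  simp [List.findIdx?_cons]

theorem pvKey_lt_len {order : List String} {sid : String} (h : sid ∈ order) :
    pvKey order sid < (order.length : Int) := by
  obtain ⟨i, _, hlt, he⟩ := pvKey_of_mem h
  rw [he]; exact_mod_cast hlt

theorem pvKey_prefix {p t : List String} {sid : String} (h : sid ∈ p) :
    pvKey (p ++ t) sid = pvKey p sid ∧ pvKey p sid < (p.length : Int) := by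
  obtain ⟨i, ho, hlt, he⟩ := pvKey_of_mem h
  constructor
  · unfold pvKey
    rw [List.findIdx?_append, ho]; rfl
  · rw [he]; exact_mod_cast hlt

def pvStepA (st : PySem.Set String × List String) (x : String) : PySem.Set String × List String :=
  let s := x
  if pvIDS.contains s && !(PySem.Set.contains st.1 s) then
    (PySem.Set.add st.1 s, st.2 ++ [s])
  else st

theorem loopA (t : List String) : ∀ (p : List String) (seen : PySem.Set String) (out : List String),
    seen.Nodup → (∀ s, PySem.Set.contains seen s = true ↔ s ∈ out) → out.Nodup →
    (∀ s ∈ out, s ∈ pvIDS ∧ s ∈ p) → (∀ s ∈ pvIDS, s ∈ p → s ∈ out) →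
    out.Pairwise (fun a b => pvKey (p ++ t) a < pvKey (p ++ t) b) →
    let st := t.foldl pvStepA (seen, out)
    (∀ s, PySem.Set.contains st.1 s = true ↔ s ∈ st.2) ∧ st.2.Nodup ∧
    (∀ s ∈ st.2, s ∈ pvIDS ∧ s ∈ p ++ t) ∧ (∀ s ∈ pvIDS, s ∈ p ++ t → s ∈ st.2) ∧
    st.2.Pairwise (fun a b => pvKey (p ++ t) a < pvKey (p ++ t) b) := by
  induction t with
  | nil =>
    intro p seen out hnd hseen hout h3 h4 h5
    simp only [List.foldl_nil]
    exact ⟨hseen, hout, by simpa using h3, by simpa using h4, by simpa using h5⟩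
  | cons x t ih =>
    intro p seen out hnd hseen hout h3 h4 h5
    simp only [List.foldl_cons]
    have hassoc : p ++ x :: t = (p ++ [x]) ++ t := by simp
    by_cases hx : x ∈ pvIDS ∧ ¬ (x ∈ out)
    · -- new element appended
      have hcx : PySem.Set.contains seen x = false := by
        rw [Bool.eq_false_iff]
        intro hc
        exact hx.2 ((hseen x).mp hc)
      have hxs : x ∉ seen := by simpa using hcx
      have hstep : pvStepA (seen, out) x = (PySem.Set.add seen x, out ++ [x]) := by
        unfold pvStepA
        simp [hx.1, hxs]
      rw [hstep, hassoc]
      have hxp : x ∉ p := fun hc => hx.2 (h4 x hx.1 hc)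
      refine ih (p ++ [x]) _ _ (PySem.Set.nodup_add seen x hnd) ?_ ?_ ?_ ?_ ?_
      · intro s
        rw [PySem.Set.contains_iff, PySem.Set.mem_add]
        have hms : s ∈ seen ↔ s ∈ out := by rw [← PySem.Set.contains_iff]; exact hseen s
        simp [hms]
      · simp only [List.nodup_append]
        refine ⟨hout, List.nodup_singleton x, ?_⟩
        intro a ha b hb
        simp only [List.mem_singleton] at hb
        rw [hb]
        intro h
        rw [h] at ha
        exact hx.2 ha
      · intro s hs
        rcases List.mem_append.mp hs with hs | hs
        · exact ⟨(h3 s hs).1, by simp [(h3 s hs).2]⟩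
        · simp only [List.mem_singleton] at hs
          rw [hs]
          exact ⟨hx.1, by simp⟩
      · intro s hsI hsp
        rcases List.mem_append.mp hsp with hs | hs
        · exact List.mem_append.mpr (Or.inl (h4 s hsI hs))
        · simp only [List.mem_singleton] at hs
          rw [hs]
          exact List.mem_append.mpr (Or.inr (by simp))
      · rw [← hassoc]
        rw [List.pairwise_append]
        refine ⟨h5, List.pairwise_singleton _ _, ?_⟩
        intro a ha b hb
        simp only [List.mem_singleton] at hb
        rw [hb]
        have hap : a ∈ p := (h3 a ha).2
        have h1 := @pvKey_prefix p (x :: t) a hap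
        have h2 := @pvKey_fresh p t x hxp
        rw [h1.1, h2]
        exact h1.2
    · -- unchanged state
      have hstep : pvStepA (seen, out) x = (seen, out) := by
        unfold pvStepA
        by_cases hxi : x ∈ pvIDS
        · have : x ∈ out := by
            by_contra hc
            exact hx ⟨hxi, hc⟩
          have hxse : x ∈ seen := by simpa using (hseen x).mpr this
          simp [hxse]
        · simp [hxi]
      rw [hstep, hassoc]
      refine ih (p ++ [x]) _ _ hnd hseen hout ?_ ?_ (by rw [← hassoc]; exact h5)
      · intro s hs
        exact ⟨(h3 s hs).1, by simp [(h3 s hs).2]⟩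
      · intro s hsI hsp
        rcases List.mem_append.mp hsp with hs | hs
        · exact h4 s hsI hs
        · simp only [List.mem_singleton] at hs
          rw [hs] at hsI ⊢
          by_cases hxo : x ∈ out
          · exact hxo
          · exact absurd ⟨hsI, hxo⟩ hx

theorem A_char (order : List String) :
    ∃ out : List String,
      normalize_section_order order = out ++ pvIDS.filter (fun sid => !(decide (sid ∈ out))) ∧
      out.Nodup ∧ (∀ s ∈ out, s ∈ pvIDS ∧ s ∈ order) ∧ (∀ s ∈ pvIDS, s ∈ order → s ∈ out) ∧
      out.Pairwise (fun a b => pvKey order a < pvKey order b) := by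
  have h := loopA order [] PySem.Set.empty []
    (by simp [PySem.Set.empty]) (by simp [PySem.Set.empty, PySem.Set.contains])
    List.nodup_nil (by simp) (by simp) (by simp)
  simp only [List.nil_append] at h
  obtain ⟨hseen, hnodup, h3, h4, h5⟩ := h
  set st := order.foldl pvStepA (PySem.Set.empty, []) with hst
  refine ⟨st.2, ?_, hnodup, h3, h4, h5⟩
  unfold normalize_section_order
  have hfold : order.foldl
      (fun (st : PySem.Set String × List String) x =>
        let s := x
        if pvIDS.contains s && !(PySem.Set.contains st.1 s) then
          (PySem.Set.add st.1 s, st.2 ++ [s])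
        else st) (PySem.Set.empty, []) = st := rfl
  rw [hfold]
  have h2 : (pvIDS.foldl (fun out sid => if !(PySem.Set.contains st.1 sid) then out ++ [sid] else out) st.2)
      = st.2 ++ (pvIDS.filter (fun sid => !(PySem.Set.contains st.1 sid))).map id := by
    exact PySem.List.foldl_append_if (fun sid => !(PySem.Set.contains st.1 sid)) id pvIDS st.2
  rw [h2, List.map_id]
  congr 1
  apply List.filter_congr
  intro sid _
  have hseen' : sid ∈ st.1 ↔ sid ∈ st.2 := by
    rw [← PySem.Set.contains_iff]; exact hseen sid
  by_cases hmem : sid ∈ st.2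
  · simp [hmem, hseen'.mpr hmem]
  · have hn : sid ∉ st.1 := fun hc => hmem (hseen'.mp hc)
    simp [hmem, hn]

def pvRank0 (n : Int) : PySem.Dict String Int :=
  (PySem.List.enumerate pvIDS).foldl (fun d p => d.insert p.2 (n + p.1)) PySem.Dict.empty

theorem pvRank0_eq (n : Int) : pvRank0 n = PySem.Dict.mk
    [("todos", n + 0), ("notes", n + 1), ("blockers", n + 2), ("recurring", n + 3),
     ("attachments", n + 4), ("activity", n + 5)] := by
  rfl

theorem pvRank0_get_none (n : Int) (s : String) (h : s ∉ pvIDS) :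
    (pvRank0 n).get? s = none := by
  simp only [pvIDS, List.mem_cons, List.not_mem_nil, or_false, not_or] at h
  obtain ⟨h1, h2, h3, h4, h5, h6⟩ := h
  have g1 : ("todos" = s) = False := eq_false (fun hh => h1 hh.symm)
  have g2 : ("notes" = s) = False := eq_false (fun hh => h2 hh.symm)
  have g3 : ("blockers" = s) = False := eq_false (fun hh => h3 hh.symm)
  have g4 : ("recurring" = s) = False := eq_false (fun hh => h4 hh.symm)
  have g5 : ("attachments" = s) = False := eq_false (fun hh => h5 hh.symm)
  have g6 : ("activity" = s) = False := eq_false (fun hh => h6 hh.symm)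
  rw [pvRank0_eq]
  simp [PySem.Dict.get?_mk_cons, beq_iff_eq, g1, g2, g3, g4, g5, g6]
  rfl


theorem pvRank0_get (n : Int) (sid : String) (h : sid ∈ pvIDS) :
    (pvRank0 n).get? sid = some (n + (pvIDS.idxOf sid : Int)) := by
  rw [pvRank0_eq]
  fin_cases h <;> simp [pvIDS, PySem.Dict.get?]

def pvStepB (n : Int) (d : PySem.Dict String Int) (p : Int × String) : PySem.Dict String Int :=
  let s := p.2
  if d.contains s && decide (d.getD s 0 ≥ n) then d.insert s p.1 else d

theorem loopB (order : List String) (t : List String) :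
    ∀ (p : List String) (d : PySem.Dict String Int), order = p ++ t →
    (∀ s, s ∉ pvIDS → d.get? s = none) →
    (∀ sid ∈ pvIDS, d.get? sid = some (if sid ∈ p then pvKey order sid
                        else (order.length : Int) + (pvIDS.idxOf sid : Int))) →
    ∀ sid ∈ pvIDS,
      ((PySem.List.enumerate t (p.length : Int)).foldl (pvStepB (order.length : Int)) d).getD sid 0
        = pvKey order sid := by
  induction t with
  | nil =>
    intro p d hord hnone hv sid hsid
    simp only [PySem.List.enumerate_nil, List.foldl_nil]
    rw [PySem.Dict.getD_eq_get?_getD, hv sid hsid]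
    by_cases hp : sid ∈ p
    · simp [hp]
    · have hno : sid ∉ order := by rw [hord]; simpa using hp
      rw [pvKey_of_not_mem hno, hord]
      simp [hp]
  | cons x t ih =>
    intro p d hord hnone hv sid hsid
    rw [PySem.List.enumerate_cons, List.foldl_cons]
    have hord' : order = (p ++ [x]) ++ t := by simpa using hord
    have hlen : ((p ++ [x]).length : Int) = (p.length : Int) + 1 := by simp
    by_cases hxi : x ∈ pvIDS
    · by_cases hxp : x ∈ p
      · -- already seen: value < n, guard false
        have hg : d.get? x = some (pvKey order x) := by
          rw [hv x hxi]; simp [hxp]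
        have hlt : pvKey order x < (order.length : Int) := by
          have := @pvKey_prefix p (x :: t) x hxp
          rw [hord]
          calc pvKey (p ++ x :: t) x = pvKey p x := this.1
            _ < (p.length : Int) := this.2
            _ ≤ ((p ++ x :: t).length : Int) := by simp; omega
        have hstep : pvStepB (order.length : Int) d ((p.length : Int), x) = d := by
          unfold pvStepB
          have : d.getD x 0 = pvKey order x := by
            rw [PySem.Dict.getD_eq_get?_getD, hg]; rfl
          simp only [this]
          simp [not_le.mpr hlt]
        rw [hstep, ← hlen]
        refine ih (p ++ [x]) d hord' hnone ?_ sid hsid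
        intro s hs
        rw [hv s hs]
        by_cases hsp : s ∈ p
        · have : s ∈ p ++ [x] := by simp [hsp]
          rw [if_pos hsp, if_pos this]
        · have : s ∉ p ++ [x] := by
            simp only [List.mem_append, List.mem_singleton]
            rintro (h | rfl)
            · exact hsp h
            · exact hsp hxp
          rw [if_neg hsp, if_neg this]
      · -- first occurrence: sentinel value ≥ n, guard true, insert index
        have hg : d.get? x = some ((order.length : Int) + (pvIDS.idxOf x : Int)) := by
          rw [hv x hxi]; simp [hxp]
        have hge : (order.length : Int) ≤ (order.length : Int) + (pvIDS.idxOf x : Int) := by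
          have : (0:Int) ≤ (pvIDS.idxOf x : Int) := Int.natCast_nonneg _
          omega
        have hstep : pvStepB (order.length : Int) d ((p.length : Int), x)
            = d.insert x (p.length : Int) := by
          unfold pvStepB
          have h1 : d.contains x = true := by
            rw [PySem.Dict.contains_eq_isSome_get?, hg]; rfl
          have h2 : d.getD x 0 = (order.length : Int) + (pvIDS.idxOf x : Int) := by
            rw [PySem.Dict.getD_eq_get?_getD, hg]; rfl
          simp [h1, h2, hge]
        rw [hstep, ← hlen]
        refine ih (p ++ [x]) _ hord' ?_ ?_ sid hsid
        · intro s hs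
          have hne : s ≠ x := fun hc => hs (hc ▸ hxi)
          rw [PySem.Dict.get?_insert_of_ne d _ hne]
          exact hnone s hs
        · intro s hs
          by_cases hsx : s = x
          · rw [hsx, PySem.Dict.get?_insert_self]
            have hmem : x ∈ p ++ [x] := by simp
            rw [if_pos hmem]
            have : pvKey order x = (p.length : Int) := by
              rw [hord]; exact @pvKey_fresh p t x hxp
            rw [this]
          · rw [PySem.Dict.get?_insert_of_ne d _ hsx, hv s hs]
            by_cases hsp : s ∈ p
            · have : s ∈ p ++ [x] := by simp [hsp]
              rw [if_pos hsp, if_pos this]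
            · have : s ∉ p ++ [x] := by
                simp only [List.mem_append, List.mem_singleton]
                rintro (h | rfl)
                · exact hsp h
                · exact hsx rfl
              rw [if_neg hsp, if_neg this]
    · -- x not a section id: not a key, guard false
      have hgx : d.get? x = none := hnone x hxi
      have hstep : pvStepB (order.length : Int) d ((p.length : Int), x) = d := by
        unfold pvStepB
        have h1 : d.contains x = false := by
          rw [PySem.Dict.contains_eq_isSome_get?, hgx]; rfl
        simp [h1]
      rw [hstep, ← hlen]
      refine ih (p ++ [x]) d hord' hnone ?_ sid hsid
      intro s hs
      rw [hv s hs]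
      by_cases hsp : s ∈ p
      · have : s ∈ p ++ [x] := by simp [hsp]
        rw [if_pos hsp, if_pos this]
      · have : s ∉ p ++ [x] := by
          simp only [List.mem_append, List.mem_singleton]
          rintro (h | rfl)
          · exact hsp h
          · exact hxi hs
        rw [if_neg hsp, if_neg this]

theorem B_key (order : List String) :
    ∃ rank : PySem.Dict String Int,
      normalize_section_order_alt order = PySem.List.sorted pvIDS (fun sid => rank.getD sid 0) ∧
      ∀ sid ∈ pvIDS, rank.getD sid 0 = pvKey order sid := by
  refine ⟨(PySem.List.enumerate order).foldl (pvStepB (order.length : Int)) (pvRank0 (order.length : Int)), ?_, ?_⟩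
  · rfl
  · have h := loopB order order [] (pvRank0 (order.length : Int)) (by simp)
      (fun s hs => pvRank0_get_none _ s hs)
      (fun sid hsid => by rw [pvRank0_get _ sid hsid]; simp)
    simpa using h

theorem pvIDS_nodup : pvIDS.Nodup := by decide

theorem pvIDS_pairwise_idx : pvIDS.Pairwise (fun a b => pvIDS.idxOf a < pvIDS.idxOf b) := by decide

theorem main_eq (order : List String) :
    normalize_section_order order = normalize_section_order_alt order := by
  obtain ⟨out, hA, hnd, h3, h4, h5⟩ := A_char order
  obtain ⟨rank, hB, hkey⟩ := B_key order
  set M := pvIDS.filter (fun sid => !(decide (sid ∈ out))) with hM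
  have hMsub : ∀ b ∈ M, b ∈ pvIDS ∧ b ∉ out := by
    intro b hb
    rw [hM, List.mem_filter] at hb
    exact ⟨hb.1, by simpa using hb.2⟩
  have hMnotin : ∀ b ∈ M, b ∉ order := by
    intro b hb hbo
    exact (hMsub b hb).2 (h4 b (hMsub b hb).1 hbo)
  have hperm : (out ++ M).Perm pvIDS := by
    rw [List.perm_ext_iff_of_nodup ?_ pvIDS_nodup]
    · intro s
      constructor
      · intro hs
        rcases List.mem_append.mp hs with hs | hs
        · exact (h3 s hs).1
        · exact (hMsub s hs).1
      · intro hs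
        by_cases ho : s ∈ out
        · exact List.mem_append.mpr (Or.inl ho)
        · refine List.mem_append.mpr (Or.inr ?_)
          rw [hM, List.mem_filter]
          exact ⟨hs, by simpa using ho⟩
    · rw [List.nodup_append]
      refine ⟨hnd, List.Nodup.filter _ pvIDS_nodup, ?_⟩
      intro a ha b hb hab
      rw [hab] at ha
      exact (hMsub b hb).2 ha
  have hpair : (out ++ M).Pairwise (fun a b => pvKey order a < pvKey order b) := by
    rw [List.pairwise_append]
    refine ⟨h5, ?_, ?_⟩
    · have hsub : M.Sublist pvIDS := List.filter_sublist
      have := pvIDS_pairwise_idx.sublist hsub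
      refine this.imp_of_mem ?_
      intro a b ha hb hidx
      rw [pvKey_of_not_mem (hMnotin a ha), pvKey_of_not_mem (hMnotin b hb)]
      have : (pvIDS.idxOf a : Int) < (pvIDS.idxOf b : Int) := by exact_mod_cast hidx
      omega
    · intro a ha b hb
      have hlt : pvKey order a < (order.length : Int) := pvKey_lt_len (h3 a ha).2
      rw [pvKey_of_not_mem (hMnotin b hb)]
      have : (0:Int) ≤ (pvIDS.idxOf b : Int) := Int.natCast_nonneg _
      omega
  have hpairkey : (out ++ M).Pairwise (fun a b => rank.getD a 0 < rank.getD b 0) := by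
    refine hpair.imp_of_mem ?_
    intro a b ha hb hab
    have haI : a ∈ pvIDS := by
      rcases List.mem_append.mp ha with h | h
      · exact (h3 a h).1
      · exact (hMsub a h).1
    have hbI : b ∈ pvIDS := by
      rcases List.mem_append.mp hb with h | h
      · exact (h3 b h).1
      · exact (hMsub b h).1
    rw [hkey a haI, hkey b hbI]
    exact hab
  rw [hA, hB]
  exact (PySem.List.sorted_eq_of_perm_of_pairwise_lt pvIDS (out ++ M) _ hperm hpairkey).symm

-- ===== VERDICT (by name: the statement is the Claim_ definition above) =====
theorem normalize_section_order_spec : Claim_equal_normalize_section_order := by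
  intro order _
  unfold Spec_normalize_section_order
  exact main_eq order
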